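-- pv_equiv track=rewrite | github.com/driedfish-and-cheese/Algorithm | 백준/Silver/9095. 1， 2， 3 더하기/1， 2， 3 더하기.py | solve
-- ===== SOURCE A (Python) =====
-- def solve(n):
--     path = []
--     res = []
--     cnt = 0
--     def dfs(rem):
--         if(rem == 0):
--             res.append(path.copy())
--             return
--         for step in (1,2,3):
--             if(rem-step >=0 ):
--                 path.append(step)
--                 dfs(rem-step)
--                 path.pop()
--
--     dfs(n)
--     return res
-- ===== SOURCE B (Python) =====
-- def solve(n):
--     if n < 0:
--         return []
--     table = [None] * (n + 1)
--     table[0] = [[]]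
--     for k in range(1, n + 1):
--         table[k] = [[step] + c
--                     for step in (1, 2, 3) if k - step >= 0
--                     for c in table[k - step]]
--     return table[n]
-- ===== Notes on version B (the rewrite author's own statement) =====
-- stated objective: alternative
-- what changed: Replaces the recursive DFS with a mutable path/result accumulator by a bottom-up DP table where table[k] holds all compositions of k, built iteratively from smaller entries.
import Mathlib
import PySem

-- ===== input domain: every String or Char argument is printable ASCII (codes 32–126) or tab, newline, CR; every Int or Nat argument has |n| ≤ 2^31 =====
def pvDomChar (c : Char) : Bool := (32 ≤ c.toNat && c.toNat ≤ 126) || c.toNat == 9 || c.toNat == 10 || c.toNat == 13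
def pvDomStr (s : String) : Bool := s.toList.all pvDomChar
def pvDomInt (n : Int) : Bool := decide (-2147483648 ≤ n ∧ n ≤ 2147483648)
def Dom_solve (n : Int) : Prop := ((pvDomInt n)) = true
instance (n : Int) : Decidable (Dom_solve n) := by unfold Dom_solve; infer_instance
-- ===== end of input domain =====

-- B replaces A's recursive DFS (mutable path/res) by a bottom-up DP table; alternative
-- decomposition, return value proved identical for every Int input (both are total).

-- ===== PORT A =====
-- A's dfs mutates `path` and `res`; since every append is undone by pop, the net effect
-- is functional: dfs takes the current path and res and returns the extended res.
def dfsA (rem : Int) (path : List Int) (res : List (List Int)) : List (List Int) :=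
  if rem = 0 then res ++ [path]
  else
    -- for step in (1,2,3), in order, guarded by rem - step >= 0
    let res1 := if rem - 1 ≥ 0 then dfsA (rem - 1) (path ++ [1]) res else res
    let res2 := if rem - 2 ≥ 0 then dfsA (rem - 2) (path ++ [2]) res1 else res1
    if rem - 3 ≥ 0 then dfsA (rem - 3) (path ++ [3]) res2 else res2
termination_by rem.toNat
decreasing_by all_goals omega

def solve (n : Int) : List (List Int) := dfsA n [] []

-- ===== PORT B =====
-- table[k] = [[step]+c for step in (1,2,3) if k-step >= 0 for c in table[k-step]]
def entryB (t : List (List (List Int))) (k : Nat) : List (List Int) :=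
  ([1, 2, 3] : List Nat).flatMap (fun (step : Nat) =>
    if (k : Int) - (step : Int) ≥ 0 then
      (t.getD (Nat.sub k step) []).map (fun c => (step : Int) :: c)
    else [])

def solve_alt (n : Int) : List (List Int) :=
  if n < 0 then []
  else
    let m := n.toNat
    -- table[0] = [[]]; for k in range(1, n+1): table[k] = entryB table k
    let table := (List.range m).foldl (fun t i => t ++ [entryB t (i + 1)]) [[[]]]
    table.getD m []

-- ===== PRECONDITION & SPEC =====
def Spec_solve (n : Int) (out : List (List Int)) : Prop := out = solve_alt n
instance (n : Int) (out : List (List Int)) : Decidable (Spec_solve n out) := by unfold Spec_solve; infer_instance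

-- ===== CLAIM (what is proved, stated in full; the proofs are below) =====
def Claim_equal_solve : Prop := ∀ (n : Int), Dom_solve n → Spec_solve n (solve n)

-- ===== LEMMAS AND PROOFS =====

-- the mathematical list of 1/2/3-compositions of k, in A's DFS order
def C : Nat → List (List Int)
  | 0 => [[]]
  | 1 => (C 0).map (fun c => 1 :: c)
  | 2 => (C 1).map (fun c => 1 :: c) ++ (C 0).map (fun c => 2 :: c)
  | (k + 3) => (C (k + 2)).map (fun c => 1 :: c) ++ (C (k + 1)).map (fun c => 2 :: c)
      ++ (C k).map (fun c => 3 :: c)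

theorem dfsA_neg (rem : Int) (path : List Int) (res : List (List Int)) (h : rem < 0) :
    dfsA rem path res = res := by
  unfold dfsA
  have h0 : ¬ rem = 0 := by omega
  simp [h0, show ¬ (1:Int) ≤ rem by omega, show ¬ (2:Int) ≤ rem by omega,
    show ¬ (3:Int) ≤ rem by omega]

theorem dfsA_eq_C (k : Nat) (path : List Int) (res : List (List Int)) :
    dfsA (k : Int) path res = res ++ (C k).map (fun c => path ++ c) := by
  induction k using Nat.strong_induction_on generalizing path res with
  | _ k ih =>
    match k with
    | 0 => simp [dfsA, C]
    | 1 =>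
      rw [dfsA]
      simp only [show ((1 : Nat) : Int) ≠ 0 by decide, if_false,
        show ((1 : Nat) : Int) - 1 ≥ 0 by decide, if_true,
        show ¬ ((1 : Nat) : Int) - 2 ≥ 0 by decide, if_false,
        show ¬ ((1 : Nat) : Int) - 3 ≥ 0 by decide]
      rw [show ((1 : Nat) : Int) - 1 = ((0 : Nat) : Int) by decide, ih 0 (by omega)]
      simp [C]
    | 2 =>
      rw [dfsA]
      simp only [show ((2 : Nat) : Int) ≠ 0 by decide, if_false,
        show ((2 : Nat) : Int) - 1 ≥ 0 by decide, if_true,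
        show ((2 : Nat) : Int) - 2 ≥ 0 by decide,
        show ¬ ((2 : Nat) : Int) - 3 ≥ 0 by decide]
      rw [show ((2 : Nat) : Int) - 1 = ((1 : Nat) : Int) by decide, ih 1 (by omega),
        show ((2 : Nat) : Int) - 2 = ((0 : Nat) : Int) by decide, ih 0 (by omega)]
      simp [C]
    | (j + 3) =>
      rw [dfsA]
      have h0 : ¬ ((j + 3 : Nat) : Int) = 0 := by push_cast; omega
      have h1 : ((j + 3 : Nat) : Int) - 1 ≥ 0 := by push_cast; omega
      have h2 : ((j + 3 : Nat) : Int) - 2 ≥ 0 := by push_cast; omega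
      have h3 : ((j + 3 : Nat) : Int) - 3 ≥ 0 := by push_cast; omega
      simp only [h0, if_false, h1, if_true, h2, h3]
      rw [show ((j + 3 : Nat) : Int) - 1 = ((j + 2 : Nat) : Int) by push_cast; ring,
        ih (j + 2) (by omega),
        show ((j + 3 : Nat) : Int) - 2 = ((j + 1 : Nat) : Int) by push_cast; ring,
        ih (j + 1) (by omega),
        show ((j + 3 : Nat) : Int) - 3 = ((j : Nat) : Int) by push_cast; ring,
        ih j (by omega)]
      simp [C, Function.comp_def]

theorem entryB_eq_C (j : Nat) :
    entryB ((List.range (j + 1)).map C) (j + 1) = C (j + 1) := by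
  have hget : ∀ i : Nat, i ≤ j → ((List.range (j + 1)).map C).getD i [] = C i := by
    intro i hi
    rw [List.getD_eq_getElem?_getD, List.getElem?_map,
      List.getElem?_range (by omega)]
    rfl
  unfold entryB
  match j with
  | 0 =>
    simp only [List.flatMap_cons, List.flatMap_nil]
    rw [if_pos (by decide), if_neg (by decide), if_neg (by decide)]
    rw [show Nat.sub 1 1 = 0 from rfl, hget 0 (by omega)]
    simp [C]
  | 1 =>
    simp only [List.flatMap_cons, List.flatMap_nil]
    rw [if_pos (by decide), if_pos (by decide), if_neg (by decide)]
    rw [show Nat.sub 2 1 = 1 from rfl, hget 1 (by omega),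
      show Nat.sub 2 2 = 0 from rfl, hget 0 (by omega)]
    simp [C]
  | (i + 2) =>
    simp only [List.flatMap_cons, List.flatMap_nil]
    have g1 : ((i + 3 : Nat) : Int) - (1 : Nat) ≥ 0 := by push_cast; omega
    have g2 : ((i + 3 : Nat) : Int) - (2 : Nat) ≥ 0 := by push_cast; omega
    have g3 : ((i + 3 : Nat) : Int) - (3 : Nat) ≥ 0 := by push_cast; omega
    rw [if_pos g1, if_pos g2, if_pos g3]
    rw [show Nat.sub (i + 2 + 1) 1 = i + 2 from rfl, hget (i + 2) (by omega),
      show Nat.sub (i + 2 + 1) 2 = i + 1 from rfl, hget (i + 1) (by omega),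
      show Nat.sub (i + 2 + 1) 3 = i from rfl, hget i (by omega)]
    show _ = C (i + 3)
    simp [C]

theorem table_eq (m : Nat) :
    (List.range m).foldl (fun t i => t ++ [entryB t (i + 1)]) [[[]]]
      = (List.range (m + 1)).map C := by
  induction m with
  | zero => simp [C]
  | succ j ih =>
    rw [List.range_succ, List.foldl_append, List.foldl_cons, List.foldl_nil, ih,
      entryB_eq_C, List.range_succ (n := j + 1), List.map_append]
    rfl

theorem solve_alt_nonneg (k : Nat) : solve_alt (k : Int) = C k := by
  unfold solve_alt
  rw [if_neg (by omega)]
  simp only [Int.toNat_natCast]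
  rw [table_eq]
  rw [List.getD_eq_getElem?_getD, List.getElem?_map, List.getElem?_range (by omega)]
  rfl

-- ===== VERDICT (by name: the statement is the Claim_ definition above) =====
theorem solve_spec : Claim_equal_solve := by
  intro n _
  unfold Spec_solve solve
  rcases (by omega : 0 ≤ n ∨ n < 0) with h | h
  · obtain ⟨k, rfl⟩ := Int.eq_ofNat_of_zero_le h
    rw [dfsA_eq_C, solve_alt_nonneg]
    simp
  · rw [dfsA_neg n [] [] h]
    unfold solve_alt
    rw [if_pos h]
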